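-- pv_equiv track=rewrite | github.com/amadile/Recess-year-2 | Individual.py | odd_squares_sum
-- ===== SOURCE A (Python) =====
-- def odd_squares_sum(limit):
--     total = 0
--     n = 1
--     while n <= limit:
--         if n % 2 != 0:
--             total += n * n
--             yield total
--         n += 1
-- ===== SOURCE B (Python) =====
-- def odd_squares_sum(limit):
--     k = 1
--     while 2 * k - 1 <= limit:
--         yield k * (2 * k - 1) * (2 * k + 1) // 3
--         k += 1
-- ===== Notes on version B (the rewrite author's own statement) =====
-- stated objective: simpler
-- what changed: Replaces the running accumulator over every integer up to limit with a direct per-step closed form: iterate k while 2*k-1 <= limit and yield k*(2*k-1)*(2*k+1)//3, the exact cumulative sum of the first k odd squares.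
import Mathlib
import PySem

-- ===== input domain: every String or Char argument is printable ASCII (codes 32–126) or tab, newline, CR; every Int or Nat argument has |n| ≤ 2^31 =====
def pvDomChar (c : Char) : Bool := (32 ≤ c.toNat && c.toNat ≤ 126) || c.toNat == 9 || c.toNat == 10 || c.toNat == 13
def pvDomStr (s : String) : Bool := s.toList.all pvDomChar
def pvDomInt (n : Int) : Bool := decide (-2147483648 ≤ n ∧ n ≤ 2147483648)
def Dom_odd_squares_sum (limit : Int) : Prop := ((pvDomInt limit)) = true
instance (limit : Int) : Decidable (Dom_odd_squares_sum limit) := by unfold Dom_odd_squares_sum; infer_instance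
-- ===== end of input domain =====

-- B replaces A's running accumulator with a per-step closed form (simpler, accumulator-free).

-- ===== PORT A =====
-- literal port of A's while loop: total/n state, yield on odd n; fuel = number of iterations n = 1..limit
def oddA_loop (total n : Int) (fuel : Nat) : List Int :=
  match fuel with
  | 0 => []
  | f + 1 =>
    if PySem.Int.mod n 2 ≠ 0 then
      (total + n * n) :: oddA_loop (total + n * n) (n + 1) f
    else
      oddA_loop total (n + 1) f

def odd_squares_sum (limit : Int) : List Int := oddA_loop 0 1 limit.toNat

-- ===== PORT B =====
-- literal port of B's while loop: k counter, closed form yielded each step; fuel = iteration bound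
def oddB_loop (limit k : Int) (fuel : Nat) : List Int :=
  match fuel with
  | 0 => []
  | f + 1 =>
    if 2 * k - 1 ≤ limit then
      PySem.Int.floordiv (k * (2 * k - 1) * (2 * k + 1)) 3 :: oddB_loop limit (k + 1) f
    else
      []

def odd_squares_sum_alt (limit : Int) : List Int := oddB_loop limit 1 ((limit + 1) / 2).toNat

-- ===== PRECONDITION & SPEC =====
def Spec_odd_squares_sum (limit : Int) (out : List Int) : Prop := out = odd_squares_sum_alt limit
instance (limit : Int) (out : List Int) : Decidable (Spec_odd_squares_sum limit out) := by unfold Spec_odd_squares_sum; infer_instance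

-- ===== CLAIM (what is proved, stated in full; the proofs are below) =====
def Claim_equal_odd_squares_sum : Prop := ∀ (limit : Int), Dom_odd_squares_sum limit → Spec_odd_squares_sum limit (odd_squares_sum limit)

-- ===== LEMMAS AND PROOFS =====

-- cumulative sum of the first k odd squares, as B computes it
def pvS (k : Int) : Int := PySem.Int.floordiv (k * (2 * k - 1) * (2 * k + 1)) 3

-- the common shape both loops produce: c values pvS k, pvS (k+1), …
def pvL : Nat → Int → List Int
  | 0, _ => []
  | c + 1, k => pvS k :: pvL c (k + 1)

theorem pv_dvd3 (k : Int) : (3 : Int) ∣ k * (2 * k - 1) * (2 * k + 1) := by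
  have hk : k = 3 * (k / 3) + k % 3 := by omega
  have hr : k % 3 = 0 ∨ k % 3 = 1 ∨ k % 3 = 2 := by omega
  set q := k / 3 with hq
  rcases hr with h | h | h
  · exact ⟨q * (6 * q - 1) * (6 * q + 1), by rw [hk, h]; ring⟩
  · exact ⟨36 * q ^ 3 + 36 * q ^ 2 + 11 * q + 1, by rw [hk, h]; ring⟩
  · exact ⟨36 * q ^ 3 + 72 * q ^ 2 + 47 * q + 10, by rw [hk, h]; ring⟩

theorem pvS_exact (k : Int) : 3 * pvS k = k * (2 * k - 1) * (2 * k + 1) := by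
  unfold pvS
  rw [PySem.Int.floordiv_eq_ediv_of_pos (by norm_num)]
  exact Int.mul_ediv_cancel' (pv_dvd3 k)

theorem pvS_step (k : Int) : pvS (k - 1) + (2 * k - 1) * (2 * k - 1) = pvS k := by
  have h1 := pvS_exact k
  have h2 := pvS_exact (k - 1)
  have h3 : 3 * (pvS (k - 1) + (2 * k - 1) * (2 * k - 1)) = 3 * pvS k := by
    linear_combination h2 - h1
  omega

theorem pv_mod_odd (k : Int) : PySem.Int.mod (2 * k - 1) 2 = 1 := by
  rw [PySem.Int.mod_eq_emod_of_pos (by norm_num)]; omega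

theorem pv_mod_even (k : Int) : PySem.Int.mod (2 * k) 2 = 0 := by
  rw [PySem.Int.mod_eq_emod_of_pos (by norm_num)]; omega

-- A's loop, entered at odd n = 2k-1 with total = pvS (k-1), produces ⌈fuel/2⌉ closed-form values
theorem pvA_char : ∀ (fuel : Nat) (k : Int),
    oddA_loop (pvS (k - 1)) (2 * k - 1) fuel = pvL ((fuel + 1) / 2) k := by
  intro fuel
  induction fuel using Nat.strong_induction_on with
  | _ fuel ih =>
    match fuel with
    | 0 => intro k; rfl
    | 1 =>
      intro k
      show (if PySem.Int.mod (2 * k - 1) 2 ≠ 0 then _ else _) = _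
      rw [if_pos (by rw [pv_mod_odd]; norm_num)]
      show (pvS (k - 1) + (2 * k - 1) * (2 * k - 1)) :: [] = pvL 1 k
      rw [pvS_step]; rfl
    | f + 2 =>
      intro k
      show (if PySem.Int.mod (2 * k - 1) 2 ≠ 0 then _ else _) = _
      rw [if_pos (by rw [pv_mod_odd]; norm_num)]
      have he : (2 * k - 1) + 1 = 2 * k := by ring
      show (pvS (k - 1) + (2 * k - 1) * (2 * k - 1)) ::
          oddA_loop (pvS (k - 1) + (2 * k - 1) * (2 * k - 1)) (2 * k - 1 + 1) (f + 1) = _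
      rw [pvS_step, he]
      show pvS k :: (if PySem.Int.mod (2 * k) 2 ≠ 0 then _ else _) = _
      rw [if_neg (by rw [pv_mod_even]; simp)]
      have ih' := ih f (by omega) (k + 1)
      rw [show (k + 1) - 1 = k from by ring, show 2 * (k + 1) - 1 = 2 * k + 1 from by ring] at ih'
      rw [ih']
      have hc : (f + 2 + 1) / 2 = (f + 1) / 2 + 1 := by omega
      rw [hc]
      rfl

-- B's loop with an exact fuel count runs its guard true on every step
theorem pvB_char : ∀ (fuel : Nat) (limit k : Int),
    2 * k - 3 + 2 * (fuel : Int) ≤ limit → oddB_loop limit k fuel = pvL fuel k := by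
  intro fuel
  induction fuel with
  | zero => intro _ _ _; rfl
  | succ f ihf =>
    intro limit k h
    have hg : 2 * k - 1 ≤ limit := by push_cast at h ⊢; omega
    show (if 2 * k - 1 ≤ limit then _ else _) = _
    rw [if_pos hg]
    show pvS k :: oddB_loop limit (k + 1) f = pvS k :: pvL f (k + 1)
    rw [ihf limit (k + 1) (by push_cast at h ⊢; omega)]

theorem pv_main (limit : Int) : odd_squares_sum limit = odd_squares_sum_alt limit := by
  unfold odd_squares_sum odd_squares_sum_alt
  have h0 : pvS 0 = 0 := by decide
  have hA := pvA_char limit.toNat 1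
  rw [show (1 : Int) - 1 = 0 from by ring, show 2 * (1 : Int) - 1 = 1 from by ring, h0] at hA
  rw [hA]
  by_cases hl : 1 ≤ limit
  · rw [pvB_char (((limit + 1) / 2).toNat) limit 1 (by push_cast; omega)]
    have : (limit.toNat + 1) / 2 = ((limit + 1) / 2).toNat := by omega
    rw [this]
  · have ha : (limit.toNat + 1) / 2 = 0 := by omega
    have hb : ((limit + 1) / 2).toNat = 0 := by omega
    rw [ha, hb]; rfl

-- ===== VERDICT (by name: the statement is the Claim_ definition above) =====
theorem odd_squares_sum_spec : Claim_equal_odd_squares_sum := by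
  intro limit _
  unfold Spec_odd_squares_sum
  exact pv_main limit
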